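-- pv_equiv track=rewrite | github.com/kingsleykimm/mlpractice | watch_your_language/datasets.py | translation_tokenization
-- ===== SOURCE A (Python) =====
-- def translation_tokenization(lines, ds_size):
--     source, target = [], []
--     if ds_size == None:
--         ds_size = len(lines)
--     for line in lines:
--         # split up by tab
--         if len(source) == ds_size: break
--         parts = line.split('\t')
--         if len(parts) == 2:
--             source.append([t for t in f'{parts[0]} <end>'.split(' ') if t != ''])
--             target.append([token for token in f'<bos> {parts[1]} <end>'.split(' ') if token != '']) # beginning of sequence token for target decoding (transformers),
--             # the input to the decoder (target sequence) will start with <bos> so it can predict the next actual target token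
--     return source, target
-- ===== SOURCE B (Python) =====
-- def translation_tokenization(lines, ds_size):
--     def words(s):
--         return [w for w in s.split(' ') if w]
--     pairs = [(words(p[0] + ' <end>'), words('<bos> ' + p[1] + ' <end>'))
--              for p in (line.split('\t') for line in lines)
--              if len(p) == 2]
--     limit = len(pairs) if ds_size is None else ds_size
--     kept = pairs[:limit]
--     return [s for s, _ in kept], [t for _, t in kept]
-- ===== Notes on version B (the rewrite author's own statement) =====
-- stated objective: alternative
-- what changed: Replaces A's stateful loop (two parallel output lists grown under a counter check with an early break, truncation interleaved with tokenization) by a staged pipeline: one comprehension tokenizes every valid tab pair into (source, target) tuples, a single slice truncates, and the pair list is unzipped; Pre_ excludes negative ds_size, a meaningless dataset size on which A accidentally keeps everything (its break test never fires) while B's Python slice drops items from the end - both conventions are accidental.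
-- outside the precondition, e.g. on translation_tokenization(['a\tb'], -1): A returns ([['a', '<end>']], [['<bos>', 'b', '<end>']]), B returns ([], [])
import Mathlib
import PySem

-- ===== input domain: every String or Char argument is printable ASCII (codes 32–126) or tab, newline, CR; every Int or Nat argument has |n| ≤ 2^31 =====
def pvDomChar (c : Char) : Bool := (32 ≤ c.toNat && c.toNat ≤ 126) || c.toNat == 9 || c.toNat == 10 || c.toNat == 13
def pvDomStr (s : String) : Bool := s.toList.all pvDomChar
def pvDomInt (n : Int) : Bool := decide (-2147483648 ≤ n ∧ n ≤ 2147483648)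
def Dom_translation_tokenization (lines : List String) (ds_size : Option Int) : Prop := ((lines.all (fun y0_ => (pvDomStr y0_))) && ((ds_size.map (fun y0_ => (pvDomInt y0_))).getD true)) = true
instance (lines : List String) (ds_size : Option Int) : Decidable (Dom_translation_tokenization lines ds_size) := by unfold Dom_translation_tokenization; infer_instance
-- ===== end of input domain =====

-- B re-stages A's counter/early-break loop as tokenize-all-valid-pairs, slice once, unzip (objective: alternative); return values proved equal on nonnegative ds_size.

-- ===== PORT A =====
-- s.split(sep) for the non-empty literal separators '\t' and ' ' (split? is none only for sep = "")
def pvSplit (s sep : String) : List String := (PySem.Str.split? s sep).getD []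
-- [t for t in s.split(' ') if t != '']
def pvToks (s : String) : List String := (pvSplit s " ").filter (fun t => t != "")

-- the loop of A: state = (source, target); break when len(source) == ds
def pvGoA (ds : Int) : List String → List (List String) → List (List String) →
    List (List String) × List (List String)
  | [], source, target => (source, target)
  | line :: rest, source, target =>
    if (source.length : Int) = ds then (source, target)
    else
      let parts := pvSplit line "\t"
      if parts.length = 2 then
        pvGoA ds rest
          (source ++ [pvToks ((parts.getD 0 "") ++ " <end>")])
          (target ++ [pvToks ("<bos> " ++ (parts.getD 1 "") ++ " <end>")])
      else
        pvGoA ds rest source target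

def translation_tokenization (lines : List String) (ds_size : Option Int) : List (List String) × List (List String) :=
  let ds : Int := match ds_size with
    | none => (lines.length : Int)
    | some n => n
  pvGoA ds lines [] []

-- ===== PORT B =====
-- [w for w in s.split(' ') if w]
def pvWords (s : String) : List String := (pvSplit s " ").filter (fun w => w != "")

def translation_tokenization_alt (lines : List String) (ds_size : Option Int) : List (List String) × List (List String) :=
  let pairs :=
    ((lines.map (fun line => pvSplit line "\t")).filter (fun p => p.length = 2)).map
      (fun p => (pvWords ((p.getD 0 "") ++ " <end>"),
                 pvWords ("<bos> " ++ (p.getD 1 "") ++ " <end>")))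
  let limit : Int := match ds_size with
    | none => (pairs.length : Int)
    | some n => n
  let kept := PySem.List.slice pairs none (some limit)
  (kept.map Prod.fst, kept.map Prod.snd)

-- ===== PRECONDITION & SPEC =====
-- Pre_ excludes negative ds_size, a meaningless dataset size on which A accidentally keeps
-- everything (its break test never fires) while B's slice drops items from the end — both
-- conventions are accidental, so that corner is outside the claim.
def Pre_translation_tokenization (lines : List String) (ds_size : Option Int) : Prop :=
  0 ≤ ds_size.getD 0
instance (lines : List String) (ds_size : Option Int) : Decidable (Pre_translation_tokenization lines ds_size) := by unfold Pre_translation_tokenization; infer_instance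

def pvWitness_translation_tokenization : List String × Option Int := (["hi\tthere", "no tab"], some 1)

def Spec_translation_tokenization (lines : List String) (ds_size : Option Int) (out : List (List String) × List (List String)) : Prop := out = translation_tokenization_alt lines ds_size
instance (lines : List String) (ds_size : Option Int) (out : List (List String) × List (List String)) : Decidable (Spec_translation_tokenization lines ds_size out) := by unfold Spec_translation_tokenization; infer_instance

-- ===== CLAIM =====
def Claim_equal_translation_tokenization : Prop := ∀ (lines : List String) (ds_size : Option Int), Dom_translation_tokenization lines ds_size → Pre_translation_tokenization lines ds_size → Spec_translation_tokenization lines ds_size (translation_tokenization lines ds_size)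

-- ===== LEMMAS AND PROOFS =====
def pvValid (lines : List String) : List (List String) :=
  (lines.map (fun l => pvSplit l "\t")).filter (fun p => p.length = 2)

def pvSrcOf (p : List String) : List String := pvToks ((p.getD 0 "") ++ " <end>")
def pvTgtOf (p : List String) : List String := pvToks ("<bos> " ++ (p.getD 1 "") ++ " <end>")

-- 0 ≤ len src ≤ ds: A collects the first (ds - len src) valid pairs
theorem pvGoA_nonneg (ds : Int) :
    ∀ (lines : List String) (src tgt : List (List String)), (src.length : Int) ≤ ds →
      pvGoA ds lines src tgt =
        (src ++ ((pvValid lines).take (ds - src.length).toNat).map pvSrcOf,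
         tgt ++ ((pvValid lines).take (ds - src.length).toNat).map pvTgtOf) := by
  intro lines
  induction lines with
  | nil => intro src tgt _; simp [pvGoA, pvValid]
  | cons line rest ih =>
    intro src tgt hle
    by_cases heq : (src.length : Int) = ds
    · have h0 : (ds - src.length).toNat = 0 := by omega
      simp [pvGoA, if_pos heq, h0]
    · have hlt : (src.length : Int) < ds := lt_of_le_of_ne hle heq
      by_cases hp : (pvSplit line "\t").length = 2
      · have ih' := ih (src ++ [pvSrcOf (pvSplit line "\t")]) (tgt ++ [pvTgtOf (pvSplit line "\t")])
          (by simp; omega)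
        have htake : (ds - src.length).toNat = ((ds - (src.length + 1)).toNat) + 1 := by omega
        simp only [pvGoA, if_neg heq, if_pos hp]
        rw [show (pvToks (((pvSplit line "\t").getD 0 "") ++ " <end>")) = pvSrcOf (pvSplit line "\t") from rfl,
            show (pvToks ("<bos> " ++ ((pvSplit line "\t").getD 1 "") ++ " <end>")) = pvTgtOf (pvSplit line "\t") from rfl,
            ih']
        simp only [pvValid, List.map_cons, List.filter_cons, hp, decide_true, if_pos]
        simp only [List.length_append, List.length_cons, List.length_nil]
        rw [htake, List.take_succ_cons, List.map_cons]
        push_cast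
        simp [List.append_assoc]
      · simp only [pvGoA, if_neg heq, if_neg hp, ih src tgt hle]
        simp only [pvValid, List.map_cons, List.filter_cons]
        simp [hp]

-- B's tuple list is the valid-pair list mapped through (pvSrcOf, pvTgtOf)
theorem pvPairs_eq (lines : List String) :
    ((lines.map (fun line => pvSplit line "\t")).filter (fun p => p.length = 2)).map
      (fun p => (pvWords ((p.getD 0 "") ++ " <end>"),
                 pvWords ("<bos> " ++ (p.getD 1 "") ++ " <end>"))) =
    (pvValid lines).map (fun p => (pvSrcOf p, pvTgtOf p)) := by
  simp [pvValid, pvWords, pvSrcOf, pvTgtOf, pvToks]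

-- ===== VERDICT =====
theorem translation_tokenization_spec : Claim_equal_translation_tokenization := by
  intro lines ds_size _ hpre
  unfold Spec_translation_tokenization translation_tokenization translation_tokenization_alt
  match ds_size with
  | none =>
    have h := pvGoA_nonneg (lines.length : Int) lines [] [] (by simp)
    simp only at h
    rw [h]
    have hlen : (pvValid lines).length ≤ lines.length := by
      have := List.length_filter_le (fun p => decide (p.length = 2))
        (lines.map (fun l => pvSplit l "\t"))
      simpa [pvValid] using this
    simp only [pvPairs_eq, PySem.List.slice_to _ (by positivity : (0:Int) ≤ (((pvValid lines).map (fun p => (pvSrcOf p, pvTgtOf p))).length : Int))]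
    simp [List.map_take, List.map_map, Function.comp_def, List.take_of_length_le, hlen]
  | some n =>
    have hn : (0:Int) ≤ n := hpre
    have h := pvGoA_nonneg n lines [] [] (by simpa using hn)
    simp only at h
    rw [h]
    simp only [pvPairs_eq, PySem.List.slice_to _ hn]
    simp [List.map_take, List.map_map, Function.comp_def]
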